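-- pv_equiv track=rewrite | github.com/tomisilander/pybene | src/pybene/local_scores_gen.py | gen_sets_down
-- ===== SOURCE A (Python) =====
-- def gen_sets_down(varset: int, first_out_ix):
--     """
--     Go through all subsets of bitset varset by removing one variable at a time
--     so that subsets are always visited after supersets. Yields (var_count, x)
--     where var_count is the number of variables in the current subset
--     and x is the variable removed to get to the next subset. This order is useful
--     for marginalization of contab tensors.
--     """
--
--     var_count = sum(map(int, bin(varset)[2:]))
--
--     if var_count <= 1:
--         return
--
--     for x in range(first_out_ix):
--         yield (var_count, x)
--         xset = 1 << x  # bitset for x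
--         next_set = varset ^ xset  # remove x
--         yield from gen_sets_down(next_set, x)
-- ===== SOURCE B (Python) =====
-- def gen_sets_down(varset: int, first_out_ix):
--     """Iterative version: an explicit stack of paused loop frames
--     (vs, var_count, fo, x) replaces the recursion; pre-order DFS."""
--     var_count = varset.bit_count()
--     if var_count <= 1:
--         return
--     stack = [(varset, var_count, first_out_ix, 0)]
--     while stack:
--         vs, vc, fo, x = stack.pop()
--         if x >= fo:
--             continue
--         stack.append((vs, vc, fo, x + 1))  # resume parent after the child subtree
--         yield (vc, x)
--         child = vs ^ (1 << x)
--         cvc = child.bit_count()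
--         if cvc > 1:
--             stack.append((child, cvc, x, 0))
-- ===== Notes on version B (the rewrite author's own statement) =====
-- stated objective: alternative
-- what changed: Replaces A's recursive generator by an iterative one driven by an explicit stack of paused loop frames (varset, var_count, first_out_ix, x), popcount computed via int.bit_count().
-- outside the precondition, e.g. on gen_sets_down(-5, 2): A raises ValueError, B returns [(2, 0), (2, 1), (3, 0)]
import Mathlib
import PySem

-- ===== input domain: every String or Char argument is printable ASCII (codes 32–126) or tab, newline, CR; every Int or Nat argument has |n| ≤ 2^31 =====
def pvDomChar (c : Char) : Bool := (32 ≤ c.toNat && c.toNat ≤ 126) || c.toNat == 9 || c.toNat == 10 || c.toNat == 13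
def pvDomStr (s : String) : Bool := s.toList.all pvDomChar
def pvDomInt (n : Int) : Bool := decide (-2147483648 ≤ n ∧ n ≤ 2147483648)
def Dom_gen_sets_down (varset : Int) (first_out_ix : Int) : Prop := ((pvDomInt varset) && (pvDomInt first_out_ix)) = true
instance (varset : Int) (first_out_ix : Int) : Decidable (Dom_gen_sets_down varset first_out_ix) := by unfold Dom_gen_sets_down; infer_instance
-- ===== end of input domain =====

-- B replaces A's recursive generator by an explicit stack of paused loop frames
-- (same pre-order DFS, same yields); equivalence proved for varset ≥ 0
-- (on negative varset A raises ValueError, excluded by Pre_).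


-- ===== PORT A =====
-- bin(varset)[2:] as a list of binary digits (most significant first); exact for varset ≥ 0
def binDigits (n : Nat) : List Nat :=
  if h : n = 0 then [] else binDigits (n / 2) ++ [n % 2]
decreasing_by exact Nat.div_lt_self (Nat.pos_of_ne_zero h) (by omega)

-- sum(map(int, bin(varset)[2:]))
def popA (n : Nat) : Nat := (binDigits n).sum

mutual
-- literal transliteration of A's recursive generator (vs ≥ 0 kept as Nat)
def genA (vs : Nat) (fo : Nat) : List (Int × Int) :=
  let var_count := popA vs
  if var_count ≤ 1 then [] else loopA vs var_count fo 0
termination_by (fo, fo + 1)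

-- the 'for x in range(first_out_ix)' loop of A, resumable at index x
def loopA (vs var_count fo x : Nat) : List (Int × Int) :=
  if x < fo then
    ((var_count : Int), (x : Int)) ::
      (genA (vs ^^^ (1 <<< x)) x ++ loopA vs var_count fo (x + 1))
  else []
termination_by (fo, fo - x)
end

-- negative first_out_ix gives an empty range; negative varset raises (excluded by Pre_)
def gen_sets_down (varset : Int) (first_out_ix : Int) : List (Int × Int) :=
  genA varset.toNat first_out_ix.toNat

-- ===== PORT B =====
-- varset.bit_count()
def popB (n : Nat) : Nat :=
  if h : n = 0 then 0 else n % 2 + popB (n / 2)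
decreasing_by exact Nat.div_lt_self (Nat.pos_of_ne_zero h) (by omega)

-- a stack frame (vs, var_count, fo, x); weight for the loop's termination measure
def frameW (f : Nat × Nat × Nat × Nat) : Nat := 2 ^ (f.2.2.1 + 1) - 2 ^ (f.2.2.2 + 1)
def stackW (st : List (Nat × Nat × Nat × Nat)) : Nat := st.length + (st.map frameW).sum

-- B's while-loop over the explicit stack (head = top of stack)
def runStack : List (Nat × Nat × Nat × Nat) → List (Int × Int)
  | [] => []
  | (vs, vc, fo, x) :: rest =>
    if h : x < fo then
      ((vc : Int), (x : Int)) ::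
        runStack ((if 1 < popB (vs ^^^ (1 <<< x)) then [(vs ^^^ (1 <<< x), popB (vs ^^^ (1 <<< x)), x, 0)] else [])
          ++ (vs, vc, fo, x + 1) :: rest)
    else runStack rest
termination_by st => stackW st
decreasing_by
  · have h2 : 2 ^ (x + 2) = 2 * 2 ^ (x + 1) := by ring
    have h3 : 2 ^ (x + 2) ≤ 2 ^ (fo + 1) := Nat.pow_le_pow_right (by omega) (by omega)
    have h4 : 2 ≤ 2 ^ (x + 1) := by
      calc 2 = 2 ^ 1 := rfl
        _ ≤ 2 ^ (x + 1) := Nat.pow_le_pow_right (by omega) (by omega)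
    split <;> simp [stackW, frameW] <;> omega
  · simp [stackW]; omega

-- first_out_ix enters the frame clamped at 0: the loop guard 'x >= fo' is the same for fo ≤ 0
def gen_sets_down_alt (varset : Int) (first_out_ix : Int) : List (Int × Int) :=
  let var_count := popB varset.natAbs
  if var_count ≤ 1 then []
  else runStack [(varset.natAbs, var_count, first_out_ix.toNat, 0)]

-- ===== PRECONDITION & SPEC =====
-- Pre_ excludes varset < 0, on which A raises ValueError (int() on the '-0b…' binary string).
def Pre_gen_sets_down (varset : Int) (first_out_ix : Int) : Prop := 0 ≤ varset
instance (varset : Int) (first_out_ix : Int) : Decidable (Pre_gen_sets_down varset first_out_ix) := by unfold Pre_gen_sets_down; infer_instance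
def pvWitness_gen_sets_down : Int × Int := (13, 3)

def Spec_gen_sets_down (varset : Int) (first_out_ix : Int) (out : List (Int × Int)) : Prop := out = gen_sets_down_alt varset first_out_ix
instance (varset : Int) (first_out_ix : Int) (out : List (Int × Int)) : Decidable (Spec_gen_sets_down varset first_out_ix out) := by unfold Spec_gen_sets_down; infer_instance

-- ===== CLAIM (what is proved, stated in full; the proofs are below) =====
def Claim_equal_gen_sets_down : Prop := ∀ (varset : Int) (first_out_ix : Int), Dom_gen_sets_down varset first_out_ix → Pre_gen_sets_down varset first_out_ix → Spec_gen_sets_down varset first_out_ix (gen_sets_down varset first_out_ix)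

-- ===== LEMMAS AND PROOFS =====

theorem popA_eq_popB (n : Nat) : popA n = popB n := by
  induction n using Nat.strong_induction_on with
  | _ n IH =>
    unfold popA popB binDigits
    split
    · simp [*]
    · rename_i h
      have := IH (n / 2) (Nat.div_lt_self (Nat.pos_of_ne_zero h) (by omega))
      simp [popA] at this
      simp [this]; omega

theorem run_frame (fo : Nat) : ∀ x vs rest, 1 < popB vs →
    runStack ((vs, popB vs, fo, x) :: rest) = loopA vs (popB vs) fo x ++ runStack rest := by
  induction fo using Nat.strong_induction_on with
  | _ fo IHfo =>
    suffices h : ∀ n x vs rest, fo - x ≤ n → 1 < popB vs →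
        runStack ((vs, popB vs, fo, x) :: rest) = loopA vs (popB vs) fo x ++ runStack rest by
      intro x vs rest hvc; exact h (fo - x) x vs rest le_rfl hvc
    intro n
    induction n with
    | zero =>
      intro x vs rest hn hvc
      have hxfo : ¬ x < fo := by omega
      rw [runStack, loopA]
      simp [hxfo]
    | succ n IHn =>
      intro x vs rest hn hvc
      by_cases hxfo : x < fo
      · rw [runStack, loopA]
        simp only [hxfo, dif_pos, if_pos]
        have hres : runStack ((vs, popB vs, fo, x + 1) :: rest)
            = loopA vs (popB vs) fo (x + 1) ++ runStack rest :=
          IHn (x + 1) vs rest (by omega) hvc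
        by_cases hc : 1 < popB (vs ^^^ (1 <<< x))
        · have hchild := IHfo x hxfo 0 (vs ^^^ (1 <<< x)) ((vs, popB vs, fo, x + 1) :: rest) hc
          have hgen : genA (vs ^^^ (1 <<< x)) x = loopA (vs ^^^ (1 <<< x)) (popB (vs ^^^ (1 <<< x))) x 0 := by
            rw [genA, popA_eq_popB]
            simp [Nat.not_le_of_lt hc]
          simp only [hc, if_pos, List.cons_append, List.nil_append]
          rw [hchild, hres, hgen]
          simp
        · have hgen : genA (vs ^^^ (1 <<< x)) x = [] := by
            rw [genA, popA_eq_popB]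
            simp; omega
          rw [if_neg hc]
          simp only [List.nil_append]
          rw [hres, hgen]
          simp
      · rw [runStack, loopA]
        simp [hxfo]

theorem genA_eq_alt (vs fo : Nat) :
    genA vs fo = (let vc := popB vs; if vc ≤ 1 then [] else runStack [(vs, vc, fo, 0)]) := by
  simp only []
  by_cases h : popB vs ≤ 1
  · rw [genA, popA_eq_popB]; simp [h]
  · rw [genA, popA_eq_popB]
    simp only [h]
    rw [run_frame fo 0 vs [] (by omega)]
    simp [runStack]

-- ===== VERDICT (by name: the statement is the Claim_ definition above) =====
theorem gen_sets_down_spec : Claim_equal_gen_sets_down := by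
  intro varset first_out_ix _ hpre
  unfold Pre_gen_sets_down at hpre
  unfold Spec_gen_sets_down gen_sets_down gen_sets_down_alt
  have habs : varset.natAbs = varset.toNat := by omega
  rw [habs, genA_eq_alt]
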